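-- pv_equiv track=rewrite | github.com/zengxiaofei/HapHiC | scripts/HapHiC_cluster.py | parse_RE_sites
-- ===== SOURCE A (Python) =====
-- def parse_RE_sites(sites):
--
--     output_sites = list()
--
--     for site in sites:
--         if 'N' in site:
--             output_sites.append(site.replace('N', 'A', 1))
--             output_sites.append(site.replace('N', 'T', 1))
--             output_sites.append(site.replace('N', 'C', 1))
--             output_sites.append(site.replace('N', 'G', 1))
--         else:
--             output_sites.append(site)
--
--     if 'N' not in ''.join(output_sites):
--         return output_sites
--     else:
--         return parse_RE_sites(output_sites)
-- ===== SOURCE B (Python) =====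
-- def parse_RE_sites(sites):
--     # Indexed enumeration: for each site, find the N positions once and decode
--     # every code in range(4**k) as base-4 digits into the N slots (leftmost N =
--     # most significant digit, digit order A,T,C,G), instead of A's global
--     # one-N-per-pass fixpoint over the whole growing list.
--     out = []
--     for site in sites:
--         positions = [i for i, c in enumerate(site) if c == 'N']
--         k = len(positions)
--         for code in range(4 ** k):
--             chars = list(site)
--             c = code
--             for j in range(k - 1, -1, -1):
--                 chars[positions[j]] = 'ATCG'[c % 4]
--                 c //= 4
--             out.append(''.join(chars))
--     return out
-- ===== Notes on version B (the rewrite author's own statement) =====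
-- stated objective: alternative
-- what changed: Replaces A's whole-list one-N-per-pass breadth-first fixpoint (repeated replace/join/recurse over the growing list) with a single pass that locates each site's N positions once and enumerates codes 0..4^k-1, decoding each code's base-4 digits directly into the N slots (leftmost N = most significant digit, digits mapped A,T,C,G); not measured faster, the constant factor of per-code decoding is larger.
import Mathlib
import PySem

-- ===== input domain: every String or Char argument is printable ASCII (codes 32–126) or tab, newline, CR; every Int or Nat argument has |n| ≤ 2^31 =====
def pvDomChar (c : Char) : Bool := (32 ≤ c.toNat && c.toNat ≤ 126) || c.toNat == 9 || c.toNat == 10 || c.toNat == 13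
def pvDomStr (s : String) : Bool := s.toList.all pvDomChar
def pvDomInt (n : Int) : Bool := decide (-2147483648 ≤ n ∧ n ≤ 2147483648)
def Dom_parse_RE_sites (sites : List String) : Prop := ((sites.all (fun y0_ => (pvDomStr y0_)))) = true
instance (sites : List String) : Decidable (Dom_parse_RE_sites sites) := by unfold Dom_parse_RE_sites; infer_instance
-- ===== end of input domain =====

-- B replaces A's whole-list one-N-per-pass fixpoint by locating each site's N positions
-- once and decoding every code in 0..4^k-1 (base 4, digits A,T,C,G) into those slots;
-- same return value on every input.

-- ===== PORT A =====

-- hand port of site.replace('N', b, 1): replace the FIRST occurrence of the one-char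
-- pattern 'N' by b; exact for a single-character pattern and count 1
def pvReplace1 : List Char → Char → List Char
  | [], _ => []
  | c :: cs, b => if c = 'N' then b :: cs else c :: pvReplace1 cs b

def pvRepl (s : String) (b : Char) : String := String.ofList (pvReplace1 s.toList b)

-- A's loop body (the 'for site in sites' pass building output_sites), named so that the
-- termination lemma pvTermination can speak about it
def pvStepA (sites : List String) : List String :=
  sites.foldl (fun acc site =>
    if PySem.Str.isIn "N" site = true then
      acc ++ [pvRepl site 'A', pvRepl site 'T', pvRepl site 'C', pvRepl site 'G']
    else acc ++ [site]) []

-- termination measure for A's fixpoint and per-site step shape (cited by A's decreasing_by)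
def pvCnt (s : String) : Nat := s.toList.count 'N'
def pvMx (sites : List String) : Nat := (sites.map pvCnt).foldl max 0
def pvStep1 (site : String) : List String :=
  if PySem.Str.isIn "N" site = true then
    [pvRepl site 'A', pvRepl site 'T', pvRepl site 'C', pvRepl site 'G']
  else [site]

theorem pvIsIn_N (s : String) : PySem.Str.isIn "N" s = true ↔ 'N' ∈ s.toList := by
  rw [PySem.Str.isIn_iff_infix]
  have : "N".toList = ['N'] := rfl
  rw [this, List.singleton_infix_iff]

theorem pvCount_replace1 (b : Char) : ∀ (l : List Char), 'N' ∈ l → b ≠ 'N' →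
    (pvReplace1 l b).count 'N' + 1 = l.count 'N' := by
  intro l hm hb
  induction l with
  | nil => simp at hm
  | cons c cs ih =>
    by_cases hc : c = 'N'
    · subst hc; simp [pvReplace1, hb]
    · have hm' : 'N' ∈ cs := by
        rcases List.mem_cons.mp hm with h | h
        · exact absurd h.symm hc
        · exact h
      simp [pvReplace1, hc]
      have := ih hm'
      omega

theorem pvCnt_repl (s : String) (b : Char) (h : 'N' ∈ s.toList) (hb : b ≠ 'N') :
    pvCnt (pvRepl s b) + 1 = pvCnt s := by
  have := pvCount_replace1 b s.toList h hb
  simpa [pvCnt, pvRepl] using this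

theorem pvCnt_repl_lt (s : String) (b : Char) (h : 'N' ∈ s.toList) (hb : b ≠ 'N') :
    pvCnt (pvRepl s b) < pvCnt s := by
  have := pvCnt_repl s b h hb
  omega

theorem pvJoin_flatten (l : List (List Char)) : PySem.Chars.join [] l = l.flatten := by
  induction l with
  | nil => rfl
  | cons a t ih =>
    cases t with
    | nil => simp [PySem.Chars.join_singleton]
    | cons b u =>
      have := PySem.Chars.join_cons_cons [] a b u
      simp only [List.append_nil] at this
      simp [this, ih]

theorem pvMem_join (out : List String) :
    PySem.Str.isIn "N" (PySem.Str.join "" out) = true ↔ ∃ s ∈ out, 'N' ∈ s.toList := by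
  rw [pvIsIn_N, PySem.Str.toList_join]
  have : ("" : String).toList = [] := rfl
  rw [this, pvJoin_flatten, List.mem_flatten]
  simp

theorem pvFoldl_step : ∀ (sites : List String) (acc : List String),
    sites.foldl (fun acc site =>
      if PySem.Str.isIn "N" site = true then
        acc ++ [pvRepl site 'A', pvRepl site 'T', pvRepl site 'C', pvRepl site 'G']
      else acc ++ [site]) acc = acc ++ sites.flatMap pvStep1 := by
  intro sites
  induction sites with
  | nil => simp
  | cons s t ih =>
    intro acc
    simp only [List.foldl_cons, List.flatMap_cons]
    rw [ih]
    unfold pvStep1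
    split <;> simp

theorem pvStepA_eq (sites : List String) : pvStepA sites = sites.flatMap pvStep1 := by
  unfold pvStepA
  rw [pvFoldl_step]
  simp

theorem pvLe_mx (sites : List String) (s : String) (hs : s ∈ sites) : pvCnt s ≤ pvMx sites :=
  (PySem.List.le_foldl_max (sites.map pvCnt) 0).2 _ (List.mem_map_of_mem hs)

theorem pvFoldl_max_lt (K : Nat) : ∀ (l : List Nat) (a : Nat), (∀ x ∈ l, x < K) → a < K →
    l.foldl max a < K := by
  intro l
  induction l with
  | nil => intro a _ ha; simpa using ha
  | cons x t ih =>
    intro a h ha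
    simp only [List.foldl_cons]
    exact ih _ (fun y hy => h y (List.mem_cons_of_mem _ hy))
      (by have := h x (List.mem_cons_self ..); omega)

theorem pvTermination (sites : List String)
    (h : PySem.Str.isIn "N" (PySem.Str.join "" (pvStepA sites)) = true) :
    pvMx (pvStepA sites) < pvMx sites := by
  rw [pvStepA_eq] at h ⊢
  -- the recursion fires only if some output site still contains 'N'
  obtain ⟨t, ht, hNt⟩ := (pvMem_join _).1 h
  obtain ⟨s, hs, hts⟩ := List.mem_flatMap.1 ht
  have h2 : 2 ≤ pvMx sites := by
    unfold pvStep1 at hts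
    split at hts
    · next hN =>
      have hNs := (pvIsIn_N s).1 hN
      have h1 : 1 ≤ pvCnt t := List.count_pos_iff.2 hNt
      have hone : pvCnt t + 1 = pvCnt s := by
        simp only [List.mem_cons, List.not_mem_nil, or_false] at hts
        rcases hts with rfl | rfl | rfl | rfl
        · exact pvCnt_repl s 'A' hNs (by decide)
        · exact pvCnt_repl s 'T' hNs (by decide)
        · exact pvCnt_repl s 'C' hNs (by decide)
        · exact pvCnt_repl s 'G' hNs (by decide)
      have := pvLe_mx sites s hs
      omega
    · next hN =>
      simp only [List.mem_cons, List.not_mem_nil, or_false] at hts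
      subst hts
      exact absurd ((pvIsIn_N t).2 hNt) hN
  apply pvFoldl_max_lt
  · intro x hx
    obtain ⟨u, hu, rfl⟩ := List.mem_map.1 hx
    obtain ⟨s', hs', hu'⟩ := List.mem_flatMap.1 hu
    unfold pvStep1 at hu'
    split at hu'
    · next hN =>
      have hNs := (pvIsIn_N s').1 hN
      have hle := pvLe_mx sites s' hs'
      simp only [List.mem_cons, List.not_mem_nil, or_false] at hu'
      rcases hu' with rfl | rfl | rfl | rfl
      · have := pvCnt_repl_lt s' 'A' hNs (by decide); omega
      · have := pvCnt_repl_lt s' 'T' hNs (by decide); omega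
      · have := pvCnt_repl_lt s' 'C' hNs (by decide); omega
      · have := pvCnt_repl_lt s' 'G' hNs (by decide); omega
    · next hN =>
      simp only [List.mem_cons, List.not_mem_nil, or_false] at hu'
      subst hu'
      have hz : pvCnt u = 0 := by
        simp only [pvCnt, List.count_eq_zero]
        intro hmem; exact hN ((pvIsIn_N u).2 hmem)
      omega
  · omega

def parse_RE_sites (sites : List String) : List String :=
  let output_sites := pvStepA sites
  if PySem.Str.isIn "N" (PySem.Str.join "" output_sites) = false then output_sites
  else parse_RE_sites output_sites
termination_by pvMx sites
decreasing_by
  exact pvTermination sites (eq_true_of_ne_false ‹¬ _ = false›)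

-- ===== PORT B =====

-- the inner 'for j in range(k-1, -1, -1)' loop: walk the N positions from last to first,
-- writing 'ATCG'[c % 4] at each and dividing c by 4; positions are valid nonnegative
-- indices by construction, so List.set and Nat %// are exact here
def pvFill (chars : List Char) (ps : List Nat) (c : Nat) : List Char :=
  match ps with
  | [] => chars
  | p :: ps' => pvFill (chars.set p (['A', 'T', 'C', 'G'].getD (c % 4) 'A')) ps' (c / 4)

-- body of the 'for site in sites' loop
def pvSiteLoop (out : List String) (site : String) : List String :=
  -- positions = [i for i, c in enumerate(site) if c == 'N']  (indices are Nat: all ≥ 0)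
  let positions := ((site.toList.zipIdx).filter (fun ic => ic.1 == 'N')).map (·.2)
  let k := positions.length
  -- for code in range(4 ** k): rebuild chars = list(site), decode, append ''.join(chars)
  (List.range (4 ^ k)).foldl
    (fun out code => out ++ [String.ofList (pvFill site.toList positions.reverse code)])
    out

def parse_RE_sites_alt (sites : List String) : List String :=
  sites.foldl pvSiteLoop []

-- ===== PRECONDITION & SPEC =====
def Spec_parse_RE_sites (sites : List String) (out : List String) : Prop := out = parse_RE_sites_alt sites
instance (sites : List String) (out : List String) : Decidable (Spec_parse_RE_sites sites out) := by unfold Spec_parse_RE_sites; infer_instance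

-- ===== CLAIM (what is proved, stated in full; the proofs are below) =====
def Claim_equal_parse_RE_sites : Prop := ∀ (sites : List String), Dom_parse_RE_sites sites → Spec_parse_RE_sites sites (parse_RE_sites sites)

-- ===== LEMMAS AND PROOFS =====

-- proof-side bridge: per-site depth-first expansion; both programs are shown equal to
-- sites.flatMap pvExpand
def pvExpand (site : String) : List String :=
  if PySem.Str.isIn "N" site = false then [site]
  else
    pvExpand (pvRepl site 'A') ++ pvExpand (pvRepl site 'T') ++
      pvExpand (pvRepl site 'C') ++ pvExpand (pvRepl site 'G')
termination_by pvCnt site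
decreasing_by
  all_goals
    exact pvCnt_repl_lt site _ ((pvIsIn_N site).1 (eq_true_of_ne_false ‹¬ _ = false›)) (by decide)

theorem pvExpand_noN (s : String) (h : PySem.Str.isIn "N" s = false) : pvExpand s = [s] := by
  rw [pvExpand, if_pos h]

theorem pvExpand_step1 (s : String) : pvExpand s = (pvStep1 s).flatMap pvExpand := by
  unfold pvStep1
  by_cases hc : PySem.Str.isIn "N" s = true
  · rw [if_pos hc, pvExpand, if_neg (by rw [hc]; simp)]
    simp
  · rw [if_neg hc]
    simp

theorem pvFlatMap_id (l : List String) (h : ∀ t ∈ l, pvExpand t = [t]) :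
    l.flatMap pvExpand = l := by
  induction l with
  | nil => rfl
  | cons a t ih =>
    simp only [List.flatMap_cons, h a (List.mem_cons_self ..),
      ih (fun t' ht' => h t' (List.mem_cons_of_mem _ ht'))]
    rfl

theorem pvStepExpand (sites : List String) :
    (sites.flatMap pvStep1).flatMap pvExpand = sites.flatMap pvExpand := by
  rw [List.flatMap_assoc]
  exact List.flatMap_congr (fun s _ => (pvExpand_step1 s).symm)

theorem pvMain (sites : List String) : parse_RE_sites sites = sites.flatMap pvExpand := by
  generalize hn : pvMx sites = n
  induction n using Nat.strong_induction_on generalizing sites with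
  | _ n ih =>
    rw [parse_RE_sites]
    by_cases hstop : PySem.Str.isIn "N" (PySem.Str.join "" (pvStepA sites)) = false
    · rw [if_pos hstop]
      have hnone : ∀ t ∈ pvStepA sites, pvExpand t = [t] := by
        intro t ht
        apply pvExpand_noN
        by_cases h : PySem.Str.isIn "N" t = false
        · exact h
        · exact absurd ((pvMem_join _).2 ⟨t, ht, (pvIsIn_N t).1 (eq_true_of_ne_false h)⟩)
            (by rw [hstop]; simp)
      calc pvStepA sites
          = (pvStepA sites).flatMap pvExpand := (pvFlatMap_id _ hnone).symm
        _ = (sites.flatMap pvStep1).flatMap pvExpand := by rw [pvStepA_eq]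
        _ = sites.flatMap pvExpand := pvStepExpand sites
    · rw [if_neg hstop]
      have hdec := pvTermination sites (eq_true_of_ne_false hstop)
      rw [ih (pvMx (pvStepA sites)) (hn ▸ hdec) (pvStepA sites) rfl,
        pvStepA_eq, pvStepExpand]

-- recursive characterization of B's positions list
def pvNPos : List Char → List Nat
  | [] => []
  | c :: cs => if c = 'N' then 0 :: (pvNPos cs).map (· + 1) else (pvNPos cs).map (· + 1)

theorem pvPositions_eq : ∀ (cs : List Char) (n : Nat),
    ((List.zipIdx cs n).filter (fun ic => ic.1 == 'N')).map (·.2) = (pvNPos cs).map (· + n) := by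
  intro cs
  induction cs with
  | nil => intro n; rfl
  | cons c cs ih =>
    intro n
    by_cases hc : c = 'N'
    · subst hc
      simp only [List.zipIdx_cons, List.filter_cons, beq_self_eq_true, if_true, List.map_cons,
        pvNPos, List.map_map, ih (n + 1)]
      refine congrArg₂ (· :: ·) (by omega) ?_
      exact List.map_congr_left (fun x _ => by simp [Function.comp]; omega)
    · simp only [List.zipIdx_cons, List.filter_cons, pvNPos, if_neg hc]
      rw [if_neg (by simp [hc]), ih (n + 1), List.map_map]
      exact List.map_congr_left (fun x _ => by simp [Function.comp]; omega)

theorem pvNPos_nil_iff (cs : List Char) : pvNPos cs = [] ↔ 'N' ∉ cs := by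
  induction cs with
  | nil => simp [pvNPos]
  | cons c cs ih =>
    by_cases hc : c = 'N'
    · subst hc; simp [pvNPos]
    · have hc' : ¬ ('N' = c) := fun h => hc h.symm
      simp [pvNPos, hc, hc', ih]

theorem pvRepl_set : ∀ (cs : List Char) (b : Char) (p : Nat) (rest : List Nat),
    pvNPos cs = p :: rest → pvReplace1 cs b = cs.set p b := by
  intro cs
  induction cs with
  | nil => intro b p rest h; simp [pvNPos] at h
  | cons c cs ih =>
    intro b p rest h
    by_cases hc : c = 'N'
    · simp [pvNPos, hc] at h
      obtain ⟨hp, _⟩ := h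
      subst hc; subst hp
      simp [pvReplace1]
    · simp [pvNPos, hc] at h
      cases hq : pvNPos cs with
      | nil => rw [hq] at h; simp at h
      | cons q rest' =>
        rw [hq] at h
        simp at h
        obtain ⟨hp, _⟩ := h
        subst hp
        simp [pvReplace1, hc, ih b q rest' hq]

theorem pvNPos_set : ∀ (cs : List Char) (b : Char) (p : Nat) (rest : List Nat), b ≠ 'N' →
    pvNPos cs = p :: rest → pvNPos (cs.set p b) = rest := by
  intro cs
  induction cs with
  | nil => intro b p rest _ h; simp [pvNPos] at h
  | cons c cs ih =>
    intro b p rest hb h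
    by_cases hc : c = 'N'
    · simp [pvNPos, hc] at h
      obtain ⟨hp, hr⟩ := h
      subst hp
      simp [pvNPos, hb, ← hr]
    · simp [pvNPos, hc] at h
      cases hq : pvNPos cs with
      | nil => rw [hq] at h; simp at h
      | cons q rest' =>
        rw [hq] at h
        simp at h
        obtain ⟨hp, hr⟩ := h
        subst hp
        simp [List.set, pvNPos, hc, ih b q rest' hb hq, ← hr]

theorem pvHead_notmem : ∀ (cs : List Char) (p : Nat) (rest : List Nat),
    pvNPos cs = p :: rest → p ∉ rest := by
  intro cs
  induction cs with
  | nil => intro p rest h; simp [pvNPos] at h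
  | cons c cs ih =>
    intro p rest h
    by_cases hc : c = 'N'
    · simp [pvNPos, hc] at h
      obtain ⟨hp, hr⟩ := h
      subst hp
      rw [← hr]
      simp
    · simp [pvNPos, hc] at h
      cases hq : pvNPos cs with
      | nil => rw [hq] at h; simp at h
      | cons q rest' =>
        rw [hq] at h
        simp at h
        obtain ⟨hp, hr⟩ := h
        subst hp
        rw [← hr]
        intro hmem
        obtain ⟨x, hx, hxe⟩ := List.mem_map.1 hmem
        have : x = q := by omega
        exact ih q rest' hq (this ▸ hx)

theorem pvFill_append : ∀ (l : List Nat) (chars : List Char) (c : Nat) (p : Nat),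
    pvFill chars (l ++ [p]) c
      = (pvFill chars l c).set p (['A', 'T', 'C', 'G'].getD ((c / 4 ^ l.length) % 4) 'A') := by
  intro l
  induction l with
  | nil => intro chars c p; simp [pvFill]
  | cons q l ih =>
    intro chars c p
    simp only [List.cons_append, pvFill, ih, List.length_cons]
    congr 2
    rw [Nat.div_div_eq_div_mul, pow_succ']

theorem pvFill_high : ∀ (l : List Nat) (chars : List Char) (b r : Nat), r < 4 ^ l.length →
    pvFill chars l (b * 4 ^ l.length + r) = pvFill chars l r := by
  intro l
  induction l with
  | nil => intro chars b r _; rfl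
  | cons q l ih =>
    intro chars b r hr
    simp only [List.length_cons] at hr
    have h4 : (4 : Nat) ^ (l.length + 1) = 4 ^ l.length * 4 := pow_succ 4 l.length
    have hm : (b * 4 ^ (l.length + 1) + r) % 4 = r % 4 := by
      rw [h4, ← mul_assoc]
      omega
    have hd : (b * 4 ^ (l.length + 1) + r) / 4 = b * 4 ^ l.length + r / 4 := by
      rw [h4, ← mul_assoc]
      omega
    have hr' : r / 4 < 4 ^ l.length := by
      rw [h4] at hr
      omega
    simp only [List.length_cons, pvFill, hm, hd, ih _ b (r / 4) hr']

theorem pvFill_set_comm : ∀ (l : List Nat) (chars : List Char) (c : Nat) (p : Nat) (x : Char),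
    p ∉ l → pvFill (chars.set p x) l c = (pvFill chars l c).set p x := by
  intro l
  induction l with
  | nil => intro chars c p x _; rfl
  | cons q l ih =>
    intro chars c p x hp
    have hpq : p ≠ q := fun h => hp (h ▸ List.mem_cons_self ..)
    have hcomm : (chars.set p x).set q (['A', 'T', 'C', 'G'].getD (c % 4) 'A')
        = (chars.set q (['A', 'T', 'C', 'G'].getD (c % 4) 'A')).set p x :=
      List.set_comm _ _ hpq
    simp only [pvFill, hcomm, ih _ _ p x (fun h => hp (List.mem_cons_of_mem _ h))]

theorem pvRange_mul4 (m : Nat) : List.range (4 * m)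
    = List.range m ++ (List.range m).map (fun r => m + r)
      ++ (List.range m).map (fun r => 2 * m + r)
      ++ (List.range m).map (fun r => 3 * m + r) := by
  have h : 4 * m = m + (m + (m + m)) := by ring
  rw [h, List.range_add, List.range_add, List.range_add]
  simp only [List.map_append, List.map_map, List.append_assoc]
  congr 2
  · congr 1
    · exact List.map_congr_left (fun x _ => by simp; omega)
    · exact List.map_congr_left (fun x _ => by simp [Function.comp]; omega)

-- one block of the enumeration: codes b*4^m .. (b+1)*4^m - 1 fill the leading N with
-- letter number b and enumerate the rest
theorem pvBlock (s : String) (p : Nat) (rest : List Nat) (b : Nat)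
    (h : pvNPos s.toList = p :: rest) (hb : b < 4) :
    (List.range (4 ^ rest.length)).map
        (fun r => String.ofList (pvFill s.toList (rest.reverse ++ [p]) (b * 4 ^ rest.length + r)))
      = (List.range (4 ^ rest.length)).map
        (fun r => String.ofList
          (pvFill (pvRepl s (['A', 'T', 'C', 'G'].getD b 'A')).toList rest.reverse r)) := by
  apply List.map_congr_left
  intro r hr
  rw [List.mem_range] at hr
  have hlen : rest.reverse.length = rest.length := List.length_reverse
  have h1 := pvFill_append rest.reverse s.toList (b * 4 ^ rest.length + r) p
  rw [hlen] at h1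
  have hpos : 0 < 4 ^ rest.length := pow_pos (by norm_num) _
  have hdiv : (b * 4 ^ rest.length + r) / 4 ^ rest.length = b := by
    rw [mul_comm, Nat.mul_add_div hpos, Nat.div_eq_of_lt hr, Nat.add_zero]
  have h2 := pvFill_high rest.reverse s.toList b r (by rw [hlen]; exact hr)
  rw [hlen] at h2
  rw [h1, hdiv, Nat.mod_eq_of_lt hb, h2,
    ← pvFill_set_comm rest.reverse s.toList r p _
      (fun hm => pvHead_notmem s.toList p rest h (List.mem_reverse.1 hm))]
  have hset : s.toList.set p (['A', 'T', 'C', 'G'].getD b 'A')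
      = (pvRepl s (['A', 'T', 'C', 'G'].getD b 'A')).toList := by
    rw [pvRepl, String.toList_ofList, pvRepl_set s.toList _ p rest h]
  rw [hset]

theorem pvEnum : ∀ (n : Nat) (s : String), (pvNPos s.toList).length = n →
    (List.range (4 ^ n)).map
        (fun code => String.ofList (pvFill s.toList (pvNPos s.toList).reverse code))
      = pvExpand s := by
  intro n
  induction n using Nat.strong_induction_on with
  | _ n ih =>
    intro s hlen
    cases hps : pvNPos s.toList with
    | nil =>
      have hn : n = 0 := by rw [hps] at hlen; simpa using hlen.symm
      subst hn
      have hNo : 'N' ∉ s.toList := (pvNPos_nil_iff _).1 hps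
      have hfalse : PySem.Str.isIn "N" s = false := by
        cases hE : PySem.Str.isIn "N" s
        · rfl
        · exact absurd ((pvIsIn_N s).1 hE) hNo
      rw [pvExpand_noN s hfalse]
      simp [pvFill]
    | cons p rest =>
      have hn : n = rest.length + 1 := by rw [hps] at hlen; simp at hlen; omega
      subst hn
      have hmem : 'N' ∈ s.toList := by
        by_contra hNo
        have h0 := (pvNPos_nil_iff s.toList).2 hNo
        rw [hps] at h0
        cases h0
      have htrue : PySem.Str.isIn "N" s = true := (pvIsIn_N s).2 hmem
      have hpow : (4 : Nat) ^ (rest.length + 1) = 4 * 4 ^ rest.length := by ring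
      have hB : ∀ (b : Nat), b < 4 →
          pvNPos (pvRepl s (['A', 'T', 'C', 'G'].getD b 'A')).toList = rest := by
        intro b hb
        rw [pvRepl, String.toList_ofList, pvRepl_set s.toList _ p rest hps]
        exact pvNPos_set s.toList _ p rest (by interval_cases b <;> decide) hps
      have hblk : ∀ (b : Nat), (hb : b < 4) →
          (List.range (4 ^ rest.length)).map
              (fun r => String.ofList
                (pvFill s.toList (rest.reverse ++ [p]) (b * 4 ^ rest.length + r)))
            = pvExpand (pvRepl s (['A', 'T', 'C', 'G'].getD b 'A')) := by
        intro b hb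
        refine (pvBlock s p rest b hps hb).trans ?_
        have hih := ih rest.length (by omega) (pvRepl s (['A', 'T', 'C', 'G'].getD b 'A'))
          (by rw [hB b hb])
        rw [hB b hb] at hih
        exact hih
      rw [List.reverse_cons, hpow, pvRange_mul4, List.map_append, List.map_append, List.map_append,
        List.map_map, List.map_map, List.map_map]
      have e0 := (List.map_congr_left (l := List.range (4 ^ rest.length))
        (f := fun code => String.ofList (pvFill s.toList (rest.reverse ++ [p]) code))
        (g := fun r => String.ofList
          (pvFill s.toList (rest.reverse ++ [p]) (0 * 4 ^ rest.length + r)))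
        (fun r _ => by norm_num)).trans (hblk 0 (by norm_num))
      have e1 := (List.map_congr_left (l := List.range (4 ^ rest.length))
        (f := (fun code => String.ofList (pvFill s.toList (rest.reverse ++ [p]) code)) ∘
          (fun r => 4 ^ rest.length + r))
        (g := fun r => String.ofList
          (pvFill s.toList (rest.reverse ++ [p]) (1 * 4 ^ rest.length + r)))
        (fun r _ => by simp [Function.comp])).trans (hblk 1 (by norm_num))
      have e2 := (List.map_congr_left (l := List.range (4 ^ rest.length))
        (f := (fun code => String.ofList (pvFill s.toList (rest.reverse ++ [p]) code)) ∘
          (fun r => 2 * 4 ^ rest.length + r))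
        (g := fun r => String.ofList
          (pvFill s.toList (rest.reverse ++ [p]) (2 * 4 ^ rest.length + r)))
        (fun r _ => by simp [Function.comp])).trans (hblk 2 (by norm_num))
      have e3 := (List.map_congr_left (l := List.range (4 ^ rest.length))
        (f := (fun code => String.ofList (pvFill s.toList (rest.reverse ++ [p]) code)) ∘
          (fun r => 3 * 4 ^ rest.length + r))
        (g := fun r => String.ofList
          (pvFill s.toList (rest.reverse ++ [p]) (3 * 4 ^ rest.length + r)))
        (fun r _ => by simp [Function.comp])).trans (hblk 3 (by norm_num))
      rw [e0, e1, e2, e3]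
      conv_rhs => rw [pvExpand]
      rw [if_neg (by rw [htrue]; simp)]
      simp [List.append_assoc]

theorem pvFoldl_app_sing {α β : Type} (f : α → β) : ∀ (l : List α) (acc : List β),
    l.foldl (fun out a => out ++ [f a]) acc = acc ++ l.map f := by
  intro l
  induction l with
  | nil => simp
  | cons a t ih => intro acc; simp [ih]

theorem pvSiteLoop_eq (out : List String) (s : String) :
    pvSiteLoop out s = out ++ pvExpand s := by
  have hpos : ((s.toList.zipIdx).filter (fun ic => ic.1 == 'N')).map (·.2) = pvNPos s.toList := by
    have := pvPositions_eq s.toList 0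
    simpa using this
  simp only [pvSiteLoop, hpos]
  rw [pvFoldl_app_sing, pvEnum (pvNPos s.toList).length s rfl]

theorem pvAlt_flatMap (sites : List String) :
    parse_RE_sites_alt sites = sites.flatMap pvExpand := by
  unfold parse_RE_sites_alt
  suffices h : ∀ (acc : List String), sites.foldl pvSiteLoop acc = acc ++ sites.flatMap pvExpand by
    simpa using h []
  induction sites with
  | nil => simp
  | cons s t ih =>
    intro acc
    rw [List.foldl_cons, pvSiteLoop_eq, ih, List.flatMap_cons, List.append_assoc]

-- ===== VERDICT (by name: the statement is the Claim_ definition above) =====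
theorem parse_RE_sites_spec : Claim_equal_parse_RE_sites := by
  intro sites _
  unfold Spec_parse_RE_sites
  rw [pvMain, pvAlt_flatMap]
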